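-- pv_equiv track=rewrite | github.com/srijac9/nexhacks | nexhacks-server/backend/process_observed2.py | merge_nodes
-- ===== SOURCE A (Python) =====
-- from typing import Any, Dict
--
-- def merge_nodes(raw_nodes: Dict[str, list]) -> Dict[str, list]:
--     """Merge overlapping nodes to produce logical connectivity."""
--     merged_nodes = []
--
--     for comps in raw_nodes.values():
--         found = False
--         for m in merged_nodes:
--             if set(m) & set(comps):  # overlap
--                 m.update(comps)
--                 found = True
--                 break
--         if not found:
--             merged_nodes.append(set(comps))
--
--     # Convert sets to sorted lists and assign node labels
--     final_nodes = {f"node_{i+1}": sorted(list(m)) for i, m in enumerate(merged_nodes)}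
--     return final_nodes
-- ===== SOURCE B (Python) =====
-- from typing import Dict
--
-- def merge_nodes(raw_nodes: Dict[str, list]) -> Dict[str, list]:
--     """Merge overlapping nodes to produce logical connectivity.
--
--     Instead of re-scanning every merged set for an overlap (A's inner loop),
--     keep a dict mapping each component to the smallest index of a merged set
--     containing it: the first overlapping set is the minimum of those indices."""
--     sets = []
--     first_idx = {}  # component -> smallest index of a merged set containing it
--     for comps in raw_nodes.values():
--         hits = [first_idx[c] for c in comps if c in first_idx]
--         if hits:
--             t = min(hits)
--             sets[t].update(comps)
--         else:
--             t = len(sets)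
--             sets.append(set(comps))
--         for c in comps:
--             j = first_idx.get(c)
--             if j is None or t < j:
--                 first_idx[c] = t
--     return {f"node_{i+1}": sorted(s) for i, s in enumerate(sets)}
-- ===== Notes on version B (the rewrite author's own statement) =====
-- stated objective: faster
-- what changed: Replaces A's inner scan over all merged sets (set-intersection test per set) by a dict mapping each component to the smallest index of a merged set containing it, so the target set is just the minimum of the indices recorded for the value's components, updated incrementally.
import Mathlib
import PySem

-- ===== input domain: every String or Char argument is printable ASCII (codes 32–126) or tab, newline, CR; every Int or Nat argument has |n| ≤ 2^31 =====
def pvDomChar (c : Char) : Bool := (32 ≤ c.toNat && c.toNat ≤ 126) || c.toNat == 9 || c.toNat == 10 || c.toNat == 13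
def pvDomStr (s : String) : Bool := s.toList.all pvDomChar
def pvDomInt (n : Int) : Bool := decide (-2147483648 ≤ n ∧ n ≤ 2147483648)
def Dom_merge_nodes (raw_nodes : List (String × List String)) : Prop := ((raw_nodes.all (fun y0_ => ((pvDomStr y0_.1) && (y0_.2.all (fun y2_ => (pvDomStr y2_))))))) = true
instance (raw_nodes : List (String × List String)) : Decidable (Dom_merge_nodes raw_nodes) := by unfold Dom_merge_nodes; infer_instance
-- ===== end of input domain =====

-- B replaces A's linear scan of all merged sets per value by a component→first-set-index
-- dict (target = min index over the value's components), same return value.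

-- ===== PORT A =====
-- A's inner 'for m in merged_nodes: if overlap: m.update(comps); break' with the 'found' flag:
-- returns the updated list at the first overlapping set, or none when no set overlaps.
def mergeFindA (merged : List (PySem.Set String)) (comps : List String) : Option (List (PySem.Set String)) :=
  match merged with
  | [] => none
  | m :: rest =>
      if PySem.Set.inter m (PySem.Set.ofList comps) ≠ [] then
        some (PySem.Set.update m comps :: rest)
      else
        match mergeFindA rest comps with
        | some rest' => some (m :: rest')
        | none => none

def merge_nodes (raw_nodes : List (String × List String)) : List (String × List String) :=
  (PySem.List.enumerate
      ((PySem.Dict.ofList raw_nodes).values.foldl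
        (fun merged comps =>
          match mergeFindA merged comps with
          | some merged' => merged'
          | none => merged ++ [PySem.Set.ofList comps]) [])).map
    (fun im => ("node_" ++ PySem.Int.toStr (im.1 + 1), PySem.List.sorted im.2 (fun x => x) false))

-- ===== PORT B =====
-- one value-step of B: hits = indices recorded for the value's components, target = their
-- minimum (or a fresh index); then update the sets and the component→index dict.
def mergeStepB (st : List (PySem.Set String) × PySem.Dict String Nat) (comps : List String) :
    List (PySem.Set String) × PySem.Dict String Nat :=
  let hits := comps.filterMap (fun c => st.2.get? c)
  let (t, sets') :=
    match PySem.List.min? hits (fun x => x) with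
    | some t => (t, st.1.modify t (fun s => PySem.Set.update s comps))
    | none => (st.1.length, st.1 ++ [PySem.Set.ofList comps])
  (sets',
   comps.foldl (fun d c =>
      match d.get? c with
      | some j => if t < j then d.insert c t else d
      | none => d.insert c t) st.2)

def merge_nodes_alt (raw_nodes : List (String × List String)) : List (String × List String) :=
  (PySem.List.enumerate
      (((PySem.Dict.ofList raw_nodes).values.foldl mergeStepB ([], PySem.Dict.empty)).1)).map
    (fun im => ("node_" ++ PySem.Int.toStr (im.1 + 1), PySem.List.sorted im.2 (fun x => x) false))

-- ===== PRECONDITION & SPEC =====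
def Spec_merge_nodes (raw_nodes : List (String × List String)) (out : List (String × List String)) : Prop := out = merge_nodes_alt raw_nodes
instance (raw_nodes : List (String × List String)) (out : List (String × List String)) : Decidable (Spec_merge_nodes raw_nodes out) := by unfold Spec_merge_nodes; infer_instance

-- ===== CLAIM (what is proved, stated in full; the proofs are below) =====
def Claim_equal_merge_nodes : Prop := ∀ (raw_nodes : List (String × List String)), Dom_merge_nodes raw_nodes → Spec_merge_nodes raw_nodes (merge_nodes raw_nodes)

-- ===== LEMMAS AND PROOFS =====

-- membership test used by the invariant
def pIn (c : String) (s : PySem.Set String) : Bool := PySem.Set.contains s c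

-- "this merged set overlaps comps"
def ovB (comps : List String) (s : PySem.Set String) : Bool := comps.any (fun c => PySem.Set.contains s c)

-- combine a target index with a previously recorded first index
def combine (t : Nat) : Option Nat → Nat
  | some j => min t j
  | none => t

-- the dict records, for every component, the first merged set containing it
def InvIdx (sets : List (PySem.Set String)) (idx : PySem.Dict String Nat) : Prop :=
  ∀ c, idx.get? c = List.findIdx? (pIn c) sets

theorem inter_ne_nil_iff (s : PySem.Set String) (comps : List String) :
    PySem.Set.inter s (PySem.Set.ofList comps) ≠ [] ↔ ovB comps s = true := by
  rw [← List.isEmpty_eq_false_iff, List.isEmpty_eq_false_iff_exists_mem]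
  simp [ovB, List.any_eq_true, PySem.Set.mem_inter, PySem.Set.mem_ofList]
  tauto

theorem findA_eq (comps : List String) : ∀ (merged : List (PySem.Set String)),
    mergeFindA merged comps =
      (List.findIdx? (ovB comps) merged).map
        (fun t => merged.modify t (fun s => PySem.Set.update s comps))
  | [] => by simp [mergeFindA]
  | m :: rest => by
      rw [mergeFindA, List.findIdx?_cons]
      by_cases h : PySem.Set.inter m (PySem.Set.ofList comps) ≠ []
      · simp [h, (inter_ne_nil_iff m comps).1 h, List.modify_zero_cons]
      · have hov : ovB comps m = false := by
          rcases Bool.eq_false_or_eq_true (ovB comps m) with h' | h'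
          · exact absurd ((inter_ne_nil_iff m comps).2 h') h
          · exact h'
        rw [if_neg h, hov, if_neg (by simp), findA_eq comps rest]
        cases List.findIdx? (ovB comps) rest <;> simp [List.modify_succ_cons]

theorem get?_foldl_step (t : Nat) : ∀ (comps : List String) (idx : PySem.Dict String Nat) (c : String),
    (comps.foldl (fun d c =>
        match d.get? c with
        | some j => if t < j then d.insert c t else d
        | none => d.insert c t) idx).get? c
      = if c ∈ comps then some (combine t (idx.get? c)) else idx.get? c
  | [], idx, c => by simp
  | x :: comps, idx, c => by
      rw [List.foldl_cons]
      have hstep : ∀ y, ((match idx.get? x with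
          | some j => if t < j then idx.insert x t else idx
          | none => idx.insert x t) : PySem.Dict String Nat).get? y
          = if y = x then some (combine t (idx.get? x)) else idx.get? y := by
        intro y
        by_cases hyx : y = x
        · subst hyx
          cases hg : idx.get? y with
          | none => simp [combine, PySem.Dict.get?_insert_self]
          | some j =>
              by_cases hlt : t < j
              · simp [hlt, combine, PySem.Dict.get?_insert_self, Nat.min_eq_left (le_of_lt hlt)]
              · simp [hlt, hg, combine, Nat.min_eq_right (Nat.le_of_not_lt hlt)]
        · cases hg : idx.get? x with
          | none => simp [hyx, PySem.Dict.get?_insert_of_ne _ _ hyx]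
          | some j =>
              by_cases hlt : t < j
              · simp [hlt, hyx, PySem.Dict.get?_insert_of_ne _ _ hyx]
              · simp [hlt, hyx]
      rw [get?_foldl_step t comps _ c]
      by_cases hc : c ∈ comps
      · rw [if_pos hc, if_pos (List.mem_cons_of_mem _ hc), hstep c]
        by_cases hcx : c = x
        · rw [if_pos hcx, hcx]
          cases hg : idx.get? x with
          | none => simp [combine]
          | some j => simp [combine]
        · rw [if_neg hcx]
      · rw [if_neg hc, hstep c]
        by_cases hcx : c = x
        · simp [hcx]
        · simp [hcx, hc]

theorem pIn_update (s : PySem.Set String) (comps : List String) (c : String) :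
    pIn c (PySem.Set.update s comps) = (pIn c s || decide (c ∈ comps)) := by
  simp only [pIn]
  rcases Bool.eq_false_or_eq_true (PySem.Set.contains s c) with h | h <;>
    rcases Classical.em (c ∈ comps) with hc | hc <;>
      simp_all [PySem.Set.mem_update]

theorem findIdx?_modify (comps : List String) (c : String) :
    ∀ (sets : List (PySem.Set String)) (t : Nat), t < sets.length →
    List.findIdx? (pIn c) (sets.modify t (fun s => PySem.Set.update s comps))
      = if c ∈ comps then some (combine t (List.findIdx? (pIn c) sets))
        else List.findIdx? (pIn c) sets
  | [], t, ht => by simp at ht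
  | a :: l, 0, _ => by
      rw [List.modify_zero_cons, List.findIdx?_cons, List.findIdx?_cons, pIn_update]
      by_cases hc : c ∈ comps
      · rw [if_pos hc]
        cases hpa : pIn c a <;>
          · simp only [hc, decide_true, Bool.true_or, Bool.false_or, if_true]
            cases List.findIdx? (pIn c) l <;> simp [combine]
      · simp [hc]
  | a :: l, t + 1, ht => by
      rw [List.modify_succ_cons, List.findIdx?_cons, List.findIdx?_cons,
          findIdx?_modify comps c l t (by simpa using ht)]
      by_cases hc : c ∈ comps
      · rw [if_pos hc, if_pos hc]
        cases hpa : pIn c a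
        · simp only [Bool.false_eq_true, if_false]
          cases hl : List.findIdx? (pIn c) l with
          | none => simp [combine]
          | some j => simp only [Option.map_some, combine]; congr 1; omega
        · simp [combine]
      · simp [hc]

theorem findIdx?_append_new (comps : List String) (c : String) (sets : List (PySem.Set String)) :
    List.findIdx? (pIn c) (sets ++ [PySem.Set.ofList comps])
      = if c ∈ comps then some (combine sets.length (List.findIdx? (pIn c) sets))
        else List.findIdx? (pIn c) sets := by
  rw [List.findIdx?_append]
  have hsingle : pIn c (PySem.Set.ofList comps) = decide (c ∈ comps) := by
    rcases Classical.em (c ∈ comps) with hc | hc <;>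
      simp [pIn, PySem.Set.mem_ofList, hc]
  cases hl : List.findIdx? (pIn c) sets with
  | none =>
      by_cases hc : c ∈ comps <;>
        simp [List.findIdx?_cons, hsingle, hc, combine]
  | some j =>
      have hj : j < sets.length := (List.findIdx?_eq_some_iff_getElem.1 hl).fst
      by_cases hc : c ∈ comps
      · simp [hc, combine, Nat.min_eq_right (le_of_lt hj)]
      · simp [hc]

theorem min_hits (sets : List (PySem.Set String)) (idx : PySem.Dict String Nat)
    (comps : List String) (hInv : InvIdx sets idx) :
    PySem.List.min? (comps.filterMap (fun c => idx.get? c)) (fun x => x)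
      = List.findIdx? (ovB comps) sets := by
  cases hov : List.findIdx? (ovB comps) sets with
  | none =>
      rw [PySem.List.min?_eq_none_iff, List.filterMap_eq_nil_iff]
      intro c hc
      rw [hInv c, List.findIdx?_eq_none_iff]
      intro s hs
      have := (List.findIdx?_eq_none_iff.1 hov) s hs
      simp only [ovB, List.any_eq_false] at this
      exact Bool.of_not_eq_true ((by simpa [pIn] using this c hc : ¬ pIn c s = true))
  | some t =>
      obtain ⟨ht, hovt, hmin⟩ := List.findIdx?_eq_some_iff_getElem.1 hov
      obtain ⟨c₀, hc₀, hc₀t⟩ := List.any_eq_true.1 hovt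
      have h1 : ∀ j ∈ comps.filterMap (fun c => idx.get? c), t ≤ j := by
        intro j hj
        obtain ⟨c, hc, hg⟩ := List.mem_filterMap.1 hj
        rw [hInv c] at hg
        obtain ⟨hjl, hpj, _⟩ := List.findIdx?_eq_some_iff_getElem.1 hg
        by_contra hlt
        exact (hmin j (Nat.lt_of_not_le hlt))
          (List.any_eq_true.2 ⟨c, hc, hpj⟩)
      have h2 : t ∈ comps.filterMap (fun c => idx.get? c) := by
        cases hg : List.findIdx? (pIn c₀) sets with
        | none =>
            exact absurd hc₀t (by simpa [pIn] using
              (List.findIdx?_eq_none_iff.1 hg) sets[t] (List.getElem_mem ht))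
        | some j₀ =>
            obtain ⟨hjl, hpj, hminc⟩ := List.findIdx?_eq_some_iff_getElem.1 hg
            have hle : j₀ ≤ t := by
              by_contra hgt
              exact (hminc t (Nat.lt_of_not_le hgt)) (by simpa [pIn] using hc₀t)
            have hge : t ≤ j₀ := h1 j₀ (List.mem_filterMap.2 ⟨c₀, hc₀, (hInv c₀).trans hg⟩)
            have : j₀ = t := Nat.le_antisymm hle hge
            exact List.mem_filterMap.2 ⟨c₀, hc₀, by rw [hInv c₀, hg, this]⟩
      cases hm : PySem.List.min? (comps.filterMap (fun c => idx.get? c)) (fun x => x) with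
      | none =>
          rw [PySem.List.min?_eq_none_iff] at hm
          rw [hm] at h2
          simp at h2
      | some m =>
          have hmt : m ≤ t := PySem.List.min?_isMin hm t h2
          have htm : t ≤ m := h1 m (PySem.List.min?_mem hm)
          rw [Nat.le_antisymm hmt htm]

theorem stepB_fst (sets : List (PySem.Set String)) (idx : PySem.Dict String Nat)
    (comps : List String) (hInv : InvIdx sets idx) :
    (mergeStepB (sets, idx) comps).1
      = (match mergeFindA sets comps with
        | some merged' => merged'
        | none => sets ++ [PySem.Set.ofList comps]) := by
  rw [findA_eq]
  unfold mergeStepB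
  simp only
  rw [min_hits sets idx comps hInv]
  cases List.findIdx? (ovB comps) sets <;> simp

theorem stepB_inv (sets : List (PySem.Set String)) (idx : PySem.Dict String Nat)
    (comps : List String) (hInv : InvIdx sets idx) :
    InvIdx (mergeStepB (sets, idx) comps).1 (mergeStepB (sets, idx) comps).2 := by
  intro c
  unfold mergeStepB
  simp only
  rw [min_hits sets idx comps hInv]
  cases hfi : List.findIdx? (ovB comps) sets with
  | some t =>
      have ht : t < sets.length := (List.findIdx?_eq_some_iff_getElem.1 hfi).fst
      simp only
      rw [get?_foldl_step, findIdx?_modify comps c sets t ht, hInv c]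
  | none =>
      simp only
      rw [get?_foldl_step, findIdx?_append_new, hInv c]

theorem loop_eq : ∀ (values : List (List String)) (sets : List (PySem.Set String))
    (idx : PySem.Dict String Nat), InvIdx sets idx →
    (values.foldl mergeStepB (sets, idx)).1
      = values.foldl (fun merged comps =>
          match mergeFindA merged comps with
          | some merged' => merged'
          | none => merged ++ [PySem.Set.ofList comps]) sets
  | [], _, _, _ => rfl
  | comps :: vs, sets, idx, hInv => by
      rw [List.foldl_cons, List.foldl_cons, ← stepB_fst sets idx comps hInv,
          ← Prod.mk.eta (p := mergeStepB (sets, idx) comps)]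
      exact loop_eq vs _ _ (stepB_inv sets idx comps hInv)

theorem invIdx_empty : InvIdx [] PySem.Dict.empty := by
  intro c
  rw [PySem.Dict.get?_empty]
  rfl

-- ===== VERDICT (by name: the statement is the Claim_ definition above) =====
theorem merge_nodes_spec : Claim_equal_merge_nodes := by
  intro raw_nodes _
  unfold Spec_merge_nodes merge_nodes merge_nodes_alt
  rw [loop_eq (PySem.Dict.ofList raw_nodes).values [] PySem.Dict.empty invIdx_empty]
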